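-- pv_equiv track=rewrite | github.com/secure-foundations/SWISS | scripts/driver.py | unpack_args
-- ===== SOURCE A (Python) =====
-- def unpack_args(args):
--   main_args = []
--   iter_arg_lists = []
--   li = None
--   for arg in args:
--     assert arg != "--incremental"
--     if arg in ("--finisher", "--breadth"):
--       if li != None:
--         iter_arg_lists.append(li)
--       li = []
--       li.append(arg)
--     else:
--       if li == None:
--         main_args.append(arg)
--       else:
--         li.append(arg)
--   if li != None:
--     iter_arg_lists.append(li)
--
--   t = []
--   for li in iter_arg_lists:
--     if len(t) > 0 and t[-1][0] == li[0]:
--       t[-1] = t[-1] + li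
--     else:
--       t.append(li)
--
--   return (main_args, t)
-- ===== SOURCE B (Python) =====
-- def unpack_args(args):
--   # Single pass: main args before the first flag; each flag token extends the
--   # current group when it repeats, otherwise opens a new group.
--   main_args = []
--   t = []
--   cur = None
--   for arg in args:
--     assert arg != "--incremental"
--     if arg in ("--finisher", "--breadth"):
--       if arg == cur:
--         t[-1].append(arg)
--       else:
--         t.append([arg])
--         cur = arg
--     elif cur is None:
--       main_args.append(arg)
--     else:
--       t[-1].append(arg)
--   return (main_args, t)
-- ===== Notes on version B (the rewrite author's own statement) =====
-- stated objective: simpler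
-- what changed: Replaces A's two sequential passes (group-building then adjacent-group merging via t[-1]=t[-1]+li list copies) with one pass that maintains main_args, the output groups and the current flag directly, appending in place.
import Mathlib
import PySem

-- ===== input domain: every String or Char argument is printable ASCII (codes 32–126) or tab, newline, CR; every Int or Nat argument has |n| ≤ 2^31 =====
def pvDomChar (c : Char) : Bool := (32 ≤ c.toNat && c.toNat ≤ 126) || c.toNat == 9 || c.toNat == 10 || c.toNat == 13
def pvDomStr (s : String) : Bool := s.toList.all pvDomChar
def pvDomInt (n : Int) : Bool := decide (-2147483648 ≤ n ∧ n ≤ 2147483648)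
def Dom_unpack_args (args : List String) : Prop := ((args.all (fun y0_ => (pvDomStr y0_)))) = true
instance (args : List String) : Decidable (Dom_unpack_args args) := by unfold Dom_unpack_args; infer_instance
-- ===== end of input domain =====

-- B replaces A's two passes (group building, then adjacent-group merging) with one
-- pass keeping main_args, the output groups and the current flag; same return value.

-- ===== PORT A =====
-- one step of A's first loop; state = (main_args, iter_arg_lists, li)
def pvStepA (s : List String × List (List String) × Option (List String)) (arg : String) :
    List String × List (List String) × Option (List String) :=
  if arg == "--finisher" || arg == "--breadth" then
    match s.2.2 with
    | some l => (s.1, s.2.1 ++ [l], some [arg])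
    | none   => (s.1, s.2.1, some [arg])
  else
    match s.2.2 with
    | none   => (s.1 ++ [arg], s.2.1, none)
    | some l => (s.1, s.2.1, some (l ++ [arg]))

-- one step of A's second loop: 'if len(t) > 0 and t[-1][0] == li[0]: t[-1] = t[-1] + li else: t.append(li)'
def pvMergeStep (t : List (List String)) (li : List String) : List (List String) :=
  if 0 < t.length ∧ PySem.List.pyGetD (PySem.List.pyGetD t (-1) []) 0 "" = PySem.List.pyGetD li 0 "" then
    t.dropLast ++ [PySem.List.pyGetD t (-1) [] ++ li]
  else t ++ [li]

def unpack_args (args : List String) : List String × List (List String) :=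
  let s := args.foldl pvStepA ([], [], none)
  let iter_arg_lists := match s.2.2 with
    | some l => s.2.1 ++ [l]
    | none   => s.2.1
  (s.1, iter_arg_lists.foldl pvMergeStep [])

-- ===== PORT B =====
-- 't[-1].append(arg)'; in B this only runs with t nonempty (cur ≠ None ⇒ t ≠ [])
def pvPushLast (t : List (List String)) (a : String) : List (List String) :=
  t.dropLast ++ [PySem.List.pyGetD t (-1) [] ++ [a]]

-- one step of B's single loop; state = (main_args, t, cur)
def pvStepB (s : List String × List (List String) × Option String) (arg : String) :
    List String × List (List String) × Option String :=
  if arg == "--finisher" || arg == "--breadth" then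
    if s.2.2 == some arg then (s.1, pvPushLast s.2.1 arg, s.2.2)
    else (s.1, s.2.1 ++ [[arg]], some arg)
  else
    match s.2.2 with
    | none   => (s.1 ++ [arg], s.2.1, none)
    | some _ => (s.1, pvPushLast s.2.1 arg, s.2.2)

def unpack_args_alt (args : List String) : List String × List (List String) :=
  let s := args.foldl pvStepB ([], [], none)
  (s.1, s.2.1)

-- ===== PRECONDITION & SPEC =====
-- A (and B) raise AssertionError on any argument equal to "--incremental"; exactly those inputs are excluded.
def Pre_unpack_args (args : List String) : Prop := "--incremental" ∉ args
instance (args : List String) : Decidable (Pre_unpack_args args) := by unfold Pre_unpack_args; infer_instance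
def pvWitness_unpack_args : List String := ["a", "--finisher", "x", "--finisher", "--breadth", "y"]

def Spec_unpack_args (args : List String) (out : List String × List (List String)) : Prop := out = unpack_args_alt args
instance (args : List String) (out : List String × List (List String)) : Decidable (Spec_unpack_args args out) := by unfold Spec_unpack_args; infer_instance

-- ===== CLAIM (what is proved, stated in full; the proofs are below) =====
def Claim_equal_unpack_args : Prop := ∀ (args : List String), Dom_unpack_args args → Pre_unpack_args args → Spec_unpack_args args (unpack_args args)

-- ===== LEMMAS AND PROOFS =====

-- the merged list A's second loop produces from a list of groups
def pvMerge (xs : List (List String)) : List (List String) := xs.foldl pvMergeStep []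

-- the invariant relating A's loop state to B's loop state
def pvRel (sA : List String × List (List String) × Option (List String))
    (sB : List String × List (List String) × Option String) : Prop :=
  sB.1 = sA.1 ∧
  ((sA.2.2 = none ∧ sB.2.2 = none ∧ sA.2.1 = [] ∧ sB.2.1 = []) ∨
   (∃ f l, sA.2.2 = some l ∧ sB.2.2 = some f ∧ l.headI = f ∧
     (f = "--finisher" ∨ f = "--breadth") ∧ l ≠ [] ∧
     sB.2.1 = pvMerge (sA.2.1 ++ [l]) ∧ sB.2.1 ≠ [] ∧
     PySem.List.pyGetD (PySem.List.pyGetD sB.2.1 (-1) []) 0 "" = f))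

lemma pvPushLast_snoc (ys : List (List String)) (z : List String) (a : String) :
    pvPushLast (ys ++ [z]) a = ys ++ [z ++ [a]] := by
  simp [pvPushLast, PySem.List.pyGetD_neg_one_append_singleton]

lemma pvGetD0_append (l : List String) (a : List String) (h : l ≠ []) :
    PySem.List.pyGetD (l ++ a) 0 "" = PySem.List.pyGetD l 0 "" := by
  cases l with
  | nil => exact absurd rfl h
  | cons x xs => simp [PySem.List.pyGetD_zero_cons]

lemma pvMerge_snoc (xs : List (List String)) (l : List String) :
    pvMerge (xs ++ [l]) = pvMergeStep (pvMerge xs) l := by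
  simp [pvMerge, List.foldl_append]

lemma pvGetD_neg_one_singleton (x : List String) :
    PySem.List.pyGetD [x] (-1) [] = x := by
  rw [show ([x] : List (List String)) = [] ++ [x] by simp,
     PySem.List.pyGetD_neg_one_append_singleton]

lemma pvPushLast_last (t : List (List String)) (a : String) :
    PySem.List.pyGetD (pvPushLast t a) (-1) [] = PySem.List.pyGetD t (-1) [] ++ [a] := by
  simp [pvPushLast, PySem.List.pyGetD_neg_one_append_singleton]

lemma pvStep_rel (sA : List String × List (List String) × Option (List String))
    (sB : List String × List (List String) × Option String) (arg : String)
    (h : pvRel sA sB) : pvRel (pvStepA sA arg) (pvStepB sB arg) := by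
  obtain ⟨hm, hcase⟩ := h
  rcases hcase with ⟨ha, hb, hi, ht⟩ | ⟨f, l, ha, hb, hhead, hflag, hlne, htm, htne, hlast⟩
  · -- no group open yet
    by_cases hf : (arg == "--finisher" || arg == "--breadth") = true
    · refine ⟨by simp [pvStepA, pvStepB, hf, ha, hb, hm],
        Or.inr ⟨arg, [arg], by simp [pvStepA, hf, ha], by simp [pvStepB, hf, hb], rfl,
          by simpa using hf, by simp,
          by simp [pvStepB, pvStepA, hf, hb, ha, ht, hi, pvMerge, pvMergeStep],
          by simp [pvStepB, hf, hb],
          by simp [pvStepB, hf, hb, ht, pvGetD_neg_one_singleton, PySem.List.pyGetD_zero_cons]⟩⟩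
    · exact ⟨by simp [pvStepA, pvStepB, hf, ha, hb, hm],
        Or.inl (by simp [pvStepA, pvStepB, hf, ha, hb, hi, ht])⟩
  · -- a group with flag f is open
    have hfne : f ≠ "" := by rcases hflag with h1 | h1 <;> simp [h1]
    have hlastne : PySem.List.pyGetD sB.2.1 (-1) [] ≠ [] := by
      intro hzz; rw [hzz] at hlast
      simp [PySem.List.pyGetD] at hlast
      exact hfne hlast.symm
    by_cases hf : (arg == "--finisher" || arg == "--breadth") = true
    · -- arg is a flag: A closes l and opens [arg]
      have hM : pvMerge (sA.2.1 ++ [l] ++ [[arg]]) = pvMergeStep sB.2.1 [arg] := by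
        rw [pvMerge_snoc, ← htm]
      have hlen : 0 < sB.2.1.length := by
        cases hne : sB.2.1 with
        | nil => exact absurd hne htne
        | cons x xs => simp
      by_cases heq : f = arg
      · -- same flag: B appends the token to t[-1]; A's merge pass concatenates
        have hcond : 0 < sB.2.1.length ∧
            PySem.List.pyGetD (PySem.List.pyGetD sB.2.1 (-1) []) 0 "" = PySem.List.pyGetD [arg] 0 "" := by
          refine ⟨hlen, ?_⟩
          rw [hlast, heq]; simp [PySem.List.pyGetD_zero_cons]
        have hms : pvMergeStep sB.2.1 [arg] = pvPushLast sB.2.1 arg := by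
          unfold pvMergeStep; rw [if_pos hcond]; rfl
        have hbeq : (sB.2.2 == some arg) = true := by rw [hb, heq]; simp
        refine ⟨by simp [pvStepA, pvStepB, hf, ha, hbeq, hm],
          Or.inr ⟨arg, [arg], by simp [pvStepA, hf, ha], by simp [pvStepB, hb, ← heq], rfl,
            by simpa using hf, by simp, ?_, ?_, ?_⟩⟩
        · simp only [pvStepB, pvStepA, hf, ha, hbeq, if_pos]
          rw [hM, hms]
        · simp only [pvStepB, hf, hbeq, if_true]
          simp [pvPushLast]
        · simp only [pvStepB, hf, hbeq, if_true]
          rw [pvPushLast_last, pvGetD0_append _ _ hlastne, hlast, heq]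
      · -- different flag: both open a new group
        have hcond : ¬ (0 < sB.2.1.length ∧
            PySem.List.pyGetD (PySem.List.pyGetD sB.2.1 (-1) []) 0 "" = PySem.List.pyGetD [arg] 0 "") := by
          rintro ⟨-, hc⟩
          rw [hlast] at hc
          simp [PySem.List.pyGetD_zero_cons] at hc
          exact heq hc
        have hms : pvMergeStep sB.2.1 [arg] = sB.2.1 ++ [[arg]] := by
          unfold pvMergeStep; rw [if_neg hcond]
        have hbneq : (sB.2.2 == some arg) = false := by
          rw [hb]; simp [heq]
        refine ⟨by simp [pvStepA, pvStepB, hf, ha, hbneq, hm],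
          Or.inr ⟨arg, [arg], by simp [pvStepA, hf, ha], by simp [pvStepB, hf, hbneq], rfl,
            by simpa using hf, by simp, ?_, by simp [pvStepB, hf, hbneq], ?_⟩⟩
        · simp only [pvStepB, pvStepA, hf, ha, hbneq, if_true, if_false, Bool.false_eq_true]
          rw [hM, hms]
        · simp [pvStepB, hf, hbneq, PySem.List.pyGetD_zero_cons,
                PySem.List.pyGetD_neg_one_append_singleton, pvGetD_neg_one_singleton]
    · -- non-flag: A appends to l; B appends to t[-1]
      have hM2 : pvMerge (sA.2.1 ++ [l ++ [arg]]) = pvPushLast sB.2.1 arg := by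
        rw [pvMerge_snoc, htm, pvMerge_snoc]
        set M := pvMerge sA.2.1 with hMdef
        have hsame : (0 < M.length ∧
              PySem.List.pyGetD (PySem.List.pyGetD M (-1) []) 0 "" = PySem.List.pyGetD (l ++ [arg]) 0 "")
            ↔ (0 < M.length ∧
              PySem.List.pyGetD (PySem.List.pyGetD M (-1) []) 0 "" = PySem.List.pyGetD l 0 "") := by
          rw [pvGetD0_append l [arg] hlne]
        by_cases hc : 0 < M.length ∧
            PySem.List.pyGetD (PySem.List.pyGetD M (-1) []) 0 "" = PySem.List.pyGetD l 0 ""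
        · rw [show pvMergeStep M (l ++ [arg]) = M.dropLast ++ [PySem.List.pyGetD M (-1) [] ++ (l ++ [arg])] from by
            unfold pvMergeStep; rw [if_pos (hsame.mpr hc)],
            show pvMergeStep M l = M.dropLast ++ [PySem.List.pyGetD M (-1) [] ++ l] from by
            unfold pvMergeStep; rw [if_pos hc], pvPushLast_snoc]
          simp
        · rw [show pvMergeStep M (l ++ [arg]) = M ++ [l ++ [arg]] from by
            unfold pvMergeStep; rw [if_neg (by rw [hsame]; exact hc)],
            show pvMergeStep M l = M ++ [l] from by unfold pvMergeStep; rw [if_neg hc],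
            pvPushLast_snoc]
      refine ⟨by simp [pvStepA, pvStepB, hf, ha, hb, hm],
        Or.inr ⟨f, l ++ [arg], by simp [pvStepA, hf, ha], by simp [pvStepB, hf, hb], ?_,
          hflag, by simp, ?_, ?_, ?_⟩⟩
      · cases l with
        | nil => exact absurd rfl hlne
        | cons x xs => simpa using hhead
      · simp only [pvStepB, pvStepA, hf, ha, hb, if_false, Bool.false_eq_true]
        simp [hM2]
      · simp only [pvStepB, hf, hb, if_false, Bool.false_eq_true]
        simp [pvPushLast]
      · simp only [pvStepB, hf, hb, if_false, Bool.false_eq_true]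
        rw [pvPushLast_last, pvGetD0_append _ _ hlastne, hlast]

lemma pvFold_rel (args : List String) : ∀ sA sB, pvRel sA sB →
    pvRel (args.foldl pvStepA sA) (args.foldl pvStepB sB) := by
  induction args with
  | nil => intro sA sB h; exact h
  | cons a rest ih =>
    intro sA sB h
    exact ih _ _ (pvStep_rel sA sB a h)

-- ===== VERDICT (by name: the statement is the Claim_ definition above) =====
theorem unpack_args_spec : Claim_equal_unpack_args := by
  intro args _ _
  unfold Spec_unpack_args unpack_args unpack_args_alt
  have h := pvFold_rel args ([], [], none) ([], [], none) ⟨rfl, Or.inl ⟨rfl, rfl, rfl, rfl⟩⟩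
  obtain ⟨hm, hcase⟩ := h
  set sA := args.foldl pvStepA ([], [], none)
  set sB := args.foldl pvStepB ([], [], none)
  rcases hcase with ⟨ha, hb, hi, ht⟩ | ⟨f, l, ha, hb, hhead, hflag, hlne, htm, htne, hlast⟩
  · simp only [ha, hi, ht, hm]
    rfl
  · simp only [ha, hm]
    exact Prod.ext rfl (by simpa [pvMerge] using htm.symm)
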